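-- pv_equiv track=rewrite | github.com/krismaz/Thesis | Other/Networks.py | ThreeWaySort
-- ===== SOURCE A (Python) =====
-- def ThreeWayMerge(inputs):
-- 	if len(inputs)>3:
-- 		parts = [inputs[i::3] for i in range(3)]
-- 		for part in parts:
-- 			yield from ThreeWayMerge(part)
-- 		yield from zip(parts[2], parts[0][2:])
-- 		yield from zip(parts[1], parts[0][1:])
-- 		yield from zip(parts[2], parts[1][1:])
-- 		yield from zip(parts[2], parts[0][1:])
-- 	elif len(inputs) == 2:
-- 		yield (inputs[0], inputs[1])
-- 	elif len(inputs) == 3: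
-- 		yield from [(inputs[0], inputs[1]), (inputs[0], inputs[2]), (inputs[1], inputs[2])]
--
-- def ThreeWaySort(inputs):
-- 	if len(inputs) == 2:
-- 		yield (inputs[0], inputs[1] )
-- 	elif len(inputs) > 2:
-- 		yield from ThreeWaySort(inputs[0:len(inputs)//3])
-- 		yield from ThreeWaySort(inputs[len(inputs)//3:2*len(inputs)//3])
-- 		yield from ThreeWaySort(inputs[2*len(inputs)//3:])
-- 		yield from ThreeWayMerge(inputs)
-- ===== SOURCE B (Python) =====
-- def ThreeWaySort(inputs):
--     # Iterative generator: an explicit stack of (kind, data) tasks replaces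
--     # the mutual recursion of ThreeWaySort/ThreeWayMerge.
--     stack = [("sort", inputs)]
--     while stack:
--         kind, data = stack.pop()
--         n = len(data)
--         if kind == "emit":
--             yield from data
--         elif kind == "sort":
--             if n == 2:
--                 yield (data[0], data[1])
--             elif n > 2:
--                 stack.append(("merge", data))
--                 stack.append(("sort", data[2 * n // 3:]))
--                 stack.append(("sort", data[n // 3:2 * n // 3]))
--                 stack.append(("sort", data[:n // 3]))
--         else:  # "merge"
--             if n > 3:
--                 parts = [data[i::3] for i in range(3)]
--                 tail = (list(zip(parts[2], parts[0][2:]))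
--                         + list(zip(parts[1], parts[0][1:]))
--                         + list(zip(parts[2], parts[1][1:]))
--                         + list(zip(parts[2], parts[0][1:])))
--                 stack.append(("emit", tail))
--                 stack.append(("merge", parts[2]))
--                 stack.append(("merge", parts[1]))
--                 stack.append(("merge", parts[0]))
--             elif n == 2:
--                 yield (data[0], data[1])
--             elif n == 3:
--                 yield (data[0], data[1])
--                 yield (data[0], data[2])
--                 yield (data[1], data[2])
-- ===== Notes on version B (the rewrite author's own statement) =====
-- stated objective: alternative
-- what changed: Replaces the mutually recursive generator pair (ThreeWaySort/ThreeWayMerge) by a single iterative generator driven by an explicit stack of sort/merge/emit tasks, pushed so that popping reproduces A's post-order emission exactly.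
import Mathlib
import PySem

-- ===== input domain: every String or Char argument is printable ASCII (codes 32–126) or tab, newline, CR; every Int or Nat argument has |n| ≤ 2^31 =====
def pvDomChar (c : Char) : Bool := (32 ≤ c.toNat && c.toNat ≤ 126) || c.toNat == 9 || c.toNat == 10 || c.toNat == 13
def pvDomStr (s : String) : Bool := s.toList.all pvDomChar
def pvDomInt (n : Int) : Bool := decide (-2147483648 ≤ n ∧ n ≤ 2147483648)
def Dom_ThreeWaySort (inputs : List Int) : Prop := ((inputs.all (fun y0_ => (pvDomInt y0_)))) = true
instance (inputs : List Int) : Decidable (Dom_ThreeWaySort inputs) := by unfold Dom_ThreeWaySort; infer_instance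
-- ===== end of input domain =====

-- B replaces the mutually recursive generator pair by one iterative loop over an
-- explicit stack of sort/merge/emit tasks; same emitted sequence, no speed claim.

-- ===== PORT A =====
-- xs[i::3] (nonnegative start i, step 3): hand-ported as strided3 (xs.drop i),
-- which is exact for these slices (take every third element from position i on).
def strided3 : List Int → List Int
  | [] => []
  | x :: rest => x :: strided3 (rest.drop 2)
termination_by xs => xs.length
decreasing_by simp

-- cited by the termination proofs of ThreeWayMerge and pvRun
theorem strided3_length (xs : List Int) : (strided3 xs).length = (xs.length + 2) / 3 := by
  induction xs using strided3.induct with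
  | case1 => simp [strided3]
  | case2 x rest ih => simp [strided3, ih]; omega

-- xs[a:b] with 0 ≤ a ≤ b ported as (xs.drop a).take (b - a) (= PySem.List.slice_natCast).
def ThreeWayMerge (inputs : List Int) : List (Int × Int) :=
  if inputs.length > 3 then
    let p0 := strided3 inputs
    let p1 := strided3 (inputs.drop 1)
    let p2 := strided3 (inputs.drop 2)
    ThreeWayMerge p0 ++ ThreeWayMerge p1 ++ ThreeWayMerge p2 ++
      p2.zip (p0.drop 2) ++ p1.zip (p0.drop 1) ++ p2.zip (p1.drop 1) ++ p2.zip (p0.drop 1)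
  else if inputs.length = 2 then
    [(PySem.List.pyGetD inputs 0 0, PySem.List.pyGetD inputs 1 0)]
  else if inputs.length = 3 then
    [(PySem.List.pyGetD inputs 0 0, PySem.List.pyGetD inputs 1 0),
     (PySem.List.pyGetD inputs 0 0, PySem.List.pyGetD inputs 2 0),
     (PySem.List.pyGetD inputs 1 0, PySem.List.pyGetD inputs 2 0)]
  else []
termination_by inputs.length
decreasing_by
  · simp [strided3_length]; omega
  · simp [strided3_length]; omega
  · simp [strided3_length]; omega

def ThreeWaySort (inputs : List Int) : List (Int × Int) :=
  if inputs.length = 2 then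
    [(PySem.List.pyGetD inputs 0 0, PySem.List.pyGetD inputs 1 0)]
  else if inputs.length > 2 then
    ThreeWaySort (inputs.take (inputs.length / 3)) ++
    ThreeWaySort ((inputs.drop (inputs.length / 3)).take (2 * inputs.length / 3 - inputs.length / 3)) ++
    ThreeWaySort (inputs.drop (2 * inputs.length / 3)) ++
    ThreeWayMerge inputs
  else []
termination_by inputs.length
decreasing_by
  · simp; omega
  · simp; omega
  · simp; omega

-- ===== PORT B =====
inductive PvTask where
  | sort : List Int → PvTask
  | merge : List Int → PvTask
  | emit : List (Int × Int) → PvTask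

def pvTaskWeight : PvTask → Nat
  | PvTask.sort xs => 2 * 7 ^ xs.length
  | PvTask.merge xs => 7 ^ xs.length
  | PvTask.emit _ => 0

def pvStackWeight (stack : List PvTask) : Nat :=
  (stack.map pvTaskWeight).sum

-- weight bounds cited by pvRun's termination proof
theorem pv_sort_dec {a b c n : Nat} (ha : a < n) (hb : b < n) (hc : c < n) (hn : 3 ≤ n) :
    2 * 7 ^ a + 2 * 7 ^ b + 2 * 7 ^ c + 7 ^ n + 3 < 2 * 7 ^ n := by
  have h7 : (0:Nat) < 7 := by norm_num
  have Ha : 7 ^ a ≤ 7 ^ (n - 1) := Nat.pow_le_pow_right h7 (by omega)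
  have Hb : 7 ^ b ≤ 7 ^ (n - 1) := Nat.pow_le_pow_right h7 (by omega)
  have Hc : 7 ^ c ≤ 7 ^ (n - 1) := Nat.pow_le_pow_right h7 (by omega)
  have Hn : 7 ^ n = 7 * 7 ^ (n - 1) := by
    rw [← pow_succ']; congr 1; omega
  have Hbig : 7 ^ 2 ≤ 7 ^ (n - 1) := Nat.pow_le_pow_right h7 (by omega)
  norm_num at Hbig
  omega

theorem pv_merge_dec {a b c n : Nat} (ha : a < n) (hb : b < n) (hc : c < n) (hn : 4 ≤ n) :
    7 ^ a + 7 ^ b + 7 ^ c + 3 < 7 ^ n := by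
  have h7 : (0:Nat) < 7 := by norm_num
  have Ha : 7 ^ a ≤ 7 ^ (n - 1) := Nat.pow_le_pow_right h7 (by omega)
  have Hb : 7 ^ b ≤ 7 ^ (n - 1) := Nat.pow_le_pow_right h7 (by omega)
  have Hc : 7 ^ c ≤ 7 ^ (n - 1) := Nat.pow_le_pow_right h7 (by omega)
  have Hn : 7 ^ n = 7 * 7 ^ (n - 1) := by
    rw [← pow_succ']; congr 1; omega
  have Hbig : 7 ^ 2 ≤ 7 ^ (n - 1) := Nat.pow_le_pow_right h7 (by omega)
  norm_num at Hbig
  omega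

-- the iterative driver of B: pop a task, either emit pairs or push subtasks
def pvRun (stack : List PvTask) : List (Int × Int) :=
  match stack with
  | [] => []
  | PvTask.emit ps :: rest => ps ++ pvRun rest
  | PvTask.sort xs :: rest =>
    if xs.length = 2 then
      (PySem.List.pyGetD xs 0 0, PySem.List.pyGetD xs 1 0) :: pvRun rest
    else if xs.length > 2 then
      pvRun (PvTask.sort (xs.take (xs.length / 3)) ::
             PvTask.sort ((xs.drop (xs.length / 3)).take (2 * xs.length / 3 - xs.length / 3)) ::
             PvTask.sort (xs.drop (2 * xs.length / 3)) ::
             PvTask.merge xs :: rest)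
    else pvRun rest
  | PvTask.merge xs :: rest =>
    if xs.length > 3 then
      pvRun (PvTask.merge (strided3 xs) :: PvTask.merge (strided3 (xs.drop 1)) ::
             PvTask.merge (strided3 (xs.drop 2)) ::
             PvTask.emit ((strided3 (xs.drop 2)).zip ((strided3 xs).drop 2) ++
                          (strided3 (xs.drop 1)).zip ((strided3 xs).drop 1) ++
                          (strided3 (xs.drop 2)).zip ((strided3 (xs.drop 1)).drop 1) ++
                          (strided3 (xs.drop 2)).zip ((strided3 xs).drop 1)) :: rest)
    else if xs.length = 2 then
      (PySem.List.pyGetD xs 0 0, PySem.List.pyGetD xs 1 0) :: pvRun rest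
    else if xs.length = 3 then
      (PySem.List.pyGetD xs 0 0, PySem.List.pyGetD xs 1 0) ::
      (PySem.List.pyGetD xs 0 0, PySem.List.pyGetD xs 2 0) ::
      (PySem.List.pyGetD xs 1 0, PySem.List.pyGetD xs 2 0) :: pvRun rest
    else pvRun rest
termination_by pvStackWeight stack + stack.length
decreasing_by
  · simp [pvStackWeight, pvTaskWeight]
  · simp [pvStackWeight, pvTaskWeight]; omega
  · simp only [pvStackWeight, List.map_cons, List.sum_cons, pvTaskWeight, List.length_cons]
    have := pv_sort_dec (a := (xs.take (xs.length / 3)).length)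
      (b := ((xs.drop (xs.length / 3)).take (2 * xs.length / 3 - xs.length / 3)).length)
      (c := (xs.drop (2 * xs.length / 3)).length) (n := xs.length)
      (by simp; omega) (by simp; omega) (by simp; omega) (by omega)
    omega
  · have : 0 < 7 ^ xs.length := pow_pos (by norm_num) _
    simp [pvStackWeight, pvTaskWeight]; omega
  · simp only [pvStackWeight, List.map_cons, List.sum_cons, pvTaskWeight, List.length_cons]
    have := pv_merge_dec (a := (strided3 xs).length)
      (b := (strided3 (xs.drop 1)).length)
      (c := (strided3 (xs.drop 2)).length) (n := xs.length)
      (by simp [strided3_length]; omega) (by simp [strided3_length]; omega)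
      (by simp [strided3_length]; omega) (by omega)
    omega
  · have : 0 < 7 ^ xs.length := pow_pos (by norm_num) _
    simp [pvStackWeight, pvTaskWeight]; omega
  · have : 0 < 7 ^ xs.length := pow_pos (by norm_num) _
    simp [pvStackWeight, pvTaskWeight]; omega
  · have : 0 < 7 ^ xs.length := pow_pos (by norm_num) _
    simp [pvStackWeight, pvTaskWeight]; omega

def ThreeWaySort_alt (inputs : List Int) : List (Int × Int) :=
  pvRun [PvTask.sort inputs]

-- ===== PRECONDITION & SPEC =====
def Spec_ThreeWaySort (inputs : List Int) (out : List (Int × Int)) : Prop := out = ThreeWaySort_alt inputs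
instance (inputs : List Int) (out : List (Int × Int)) : Decidable (Spec_ThreeWaySort inputs out) := by unfold Spec_ThreeWaySort; infer_instance

-- ===== CLAIM (what is proved, stated in full; the proofs are below) =====
def Claim_equal_ThreeWaySort : Prop := ∀ (inputs : List Int), Dom_ThreeWaySort inputs → Spec_ThreeWaySort inputs (ThreeWaySort inputs)

-- ===== LEMMAS AND PROOFS =====
-- the meaning of one task, in terms of A's recursive functions
def pvDenote : PvTask → List (Int × Int)
  | PvTask.sort xs => ThreeWaySort xs
  | PvTask.merge xs => ThreeWayMerge xs
  | PvTask.emit ps => ps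

-- unfolding equations of A's recursive functions, one per branch
theorem TWS_two (xs : List Int) (h : xs.length = 2) :
    ThreeWaySort xs = [(PySem.List.pyGetD xs 0 0, PySem.List.pyGetD xs 1 0)] := by
  conv_lhs => rw [ThreeWaySort.eq_def]
  simp [h]

theorem TWS_small (xs : List Int) (h2 : ¬ xs.length = 2) (h3 : ¬ xs.length > 2) :
    ThreeWaySort xs = [] := by
  conv_lhs => rw [ThreeWaySort.eq_def]
  simp [h2, h3]

theorem TWS_rec (xs : List Int) (h2 : ¬ xs.length = 2) (h3 : xs.length > 2) :
    ThreeWaySort xs =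
      ThreeWaySort (xs.take (xs.length / 3)) ++
      ThreeWaySort ((xs.drop (xs.length / 3)).take (2 * xs.length / 3 - xs.length / 3)) ++
      ThreeWaySort (xs.drop (2 * xs.length / 3)) ++
      ThreeWayMerge xs := by
  conv_lhs => rw [ThreeWaySort.eq_def]
  simp [h2, h3]

theorem TWM_rec (xs : List Int) (h : xs.length > 3) :
    ThreeWayMerge xs =
      ThreeWayMerge (strided3 xs) ++ ThreeWayMerge (strided3 (xs.drop 1)) ++
      ThreeWayMerge (strided3 (xs.drop 2)) ++
      (strided3 (xs.drop 2)).zip ((strided3 xs).drop 2) ++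
      (strided3 (xs.drop 1)).zip ((strided3 xs).drop 1) ++
      (strided3 (xs.drop 2)).zip ((strided3 (xs.drop 1)).drop 1) ++
      (strided3 (xs.drop 2)).zip ((strided3 xs).drop 1) := by
  conv_lhs => rw [ThreeWayMerge.eq_def]
  simp [h]

theorem TWM_two (xs : List Int) (_h4 : ¬ xs.length > 3) (h2 : xs.length = 2) :
    ThreeWayMerge xs = [(PySem.List.pyGetD xs 0 0, PySem.List.pyGetD xs 1 0)] := by
  conv_lhs => rw [ThreeWayMerge.eq_def]
  simp [h2]

theorem TWM_three (xs : List Int) (_h4 : ¬ xs.length > 3) (_h2 : ¬ xs.length = 2) (h3 : xs.length = 3) :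
    ThreeWayMerge xs =
      [(PySem.List.pyGetD xs 0 0, PySem.List.pyGetD xs 1 0),
       (PySem.List.pyGetD xs 0 0, PySem.List.pyGetD xs 2 0),
       (PySem.List.pyGetD xs 1 0, PySem.List.pyGetD xs 2 0)] := by
  conv_lhs => rw [ThreeWayMerge.eq_def]
  simp [h3]

theorem TWM_small (xs : List Int) (h4 : ¬ xs.length > 3) (h2 : ¬ xs.length = 2) (h3 : ¬ xs.length = 3) :
    ThreeWayMerge xs = [] := by
  conv_lhs => rw [ThreeWayMerge.eq_def]
  simp [h4, h2, h3]

-- invariant of the stack loop: pvRun concatenates the denotations of its tasks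
theorem pvRun_eq (stack : List PvTask) : pvRun stack = stack.flatMap pvDenote := by
  induction stack using pvRun.induct with
  | case1 => simp [pvRun]
  | case2 ps rest ih =>
    rw [pvRun.eq_def]
    simp [pvDenote, ih]
  | case3 xs rest h ih =>
    rw [pvRun.eq_def]
    simp [pvDenote, ih, h, TWS_two xs h]
  | case4 xs rest h2 h3 ih =>
    rw [pvRun.eq_def]
    simp [pvDenote, ih, h2, h3, TWS_rec xs h2 h3]
  | case5 xs rest h2 h3 ih =>
    rw [pvRun.eq_def]
    simp [pvDenote, ih, h2, h3, TWS_small xs h2 h3]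
  | case6 xs rest h ih =>
    simp only [List.drop_one, List.append_assoc] at ih
    rw [pvRun.eq_def]
    simp [pvDenote, ih, h, TWM_rec xs h]
  | case7 xs rest h4 h2 ih =>
    rw [pvRun.eq_def]
    simp [pvDenote, ih, h2, TWM_two xs h4 h2]
  | case8 xs rest h4 h2 h3 ih =>
    rw [pvRun.eq_def]
    simp [pvDenote, ih, h3, TWM_three xs h4 h2 h3]
  | case9 xs rest h4 h2 h3 ih =>
    rw [pvRun.eq_def]
    simp [pvDenote, ih, h4, h2, h3, TWM_small xs h4 h2 h3]

-- ===== VERDICT (by name: the statement is the Claim_ definition above) =====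
theorem ThreeWaySort_spec : Claim_equal_ThreeWaySort := by
  intro inputs _
  unfold Spec_ThreeWaySort ThreeWaySort_alt
  rw [pvRun_eq]
  simp [pvDenote]
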